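-- pv_equiv track=rewrite | github.com/MohammedAlewi/competitive-programming | hacker_rank/Watering Flowers .py | watering_flowers
-- ===== SOURCE A (Python) =====
-- def watering_flowers(plants,cap1,cap2):
--     curr_1,curr_2=0,0
--     count=0
--     start,end=0,len(plants)-1
--
--     while start<=end:
--         if start==end:
--             count= count+1 if curr_1+curr_2 < plants[start] else count
--             break
--         if curr_1 < plants[start]:
--             curr_1=cap1
--             count+=1
--         if curr_2 < plants[end]:
--             curr_2=cap2
--             count+=1
--
--         curr_1-=plants[start]
--         curr_2-=plants[end]
--         start+=1
--         end-=1
--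
--     return count
-- ===== SOURCE B (Python) =====
-- def watering_flowers(plants, cap1, cap2):
--     def simulate(seq, cap):
--         curr = 0
--         cnt = 0
--         for need in seq:
--             if curr < need:
--                 curr = cap
--                 cnt += 1
--             curr -= need
--         return cnt, curr
--
--     n = len(plants)
--     h = n // 2
--     c1, r1 = simulate(plants[:h], cap1)
--     c2, r2 = simulate(list(reversed(plants))[:h], cap2)
--     total = c1 + c2
--     if n % 2 == 1 and r1 + r2 < plants[h]:
--         total += 1
--     return total
-- ===== Notes on version B (the rewrite author's own statement) =====
-- stated objective: simpler
-- what changed: Replaces the two-pointer while loop maintaining four interleaved state variables with a single reusable one-can helper applied independently to the left half and the reversed right half, plus a parity check for the middle plant.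
import Mathlib
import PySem

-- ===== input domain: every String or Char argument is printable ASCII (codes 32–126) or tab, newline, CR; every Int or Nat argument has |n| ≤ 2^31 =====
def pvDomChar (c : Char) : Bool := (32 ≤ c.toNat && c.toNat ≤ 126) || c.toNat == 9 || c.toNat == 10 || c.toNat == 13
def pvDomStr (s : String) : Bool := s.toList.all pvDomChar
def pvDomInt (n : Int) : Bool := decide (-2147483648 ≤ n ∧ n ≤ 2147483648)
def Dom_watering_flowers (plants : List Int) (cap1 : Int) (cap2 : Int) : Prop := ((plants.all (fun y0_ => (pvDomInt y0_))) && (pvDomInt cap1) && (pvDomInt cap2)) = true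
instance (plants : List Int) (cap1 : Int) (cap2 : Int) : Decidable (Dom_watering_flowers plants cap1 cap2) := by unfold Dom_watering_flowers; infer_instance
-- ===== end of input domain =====

-- B replaces A's two-pointer while loop over four interleaved state variables by one reusable
-- single-can helper run independently on the left half and the reversed right half (objective: simpler).

-- ===== PORT A =====
-- A's while loop: fuel = plants.length always suffices (the loop runs at most ⌈n/2⌉ iterations);
-- the pyGetD indices are always in range when reached, so the total form is exact.
def wfLoop (plants : List Int) (cap1 : Int) (cap2 : Int) :
    Nat → Int → Int → Int → Int → Int → Int
  | 0, _, _, _, _, count => count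
  | fuel+1, start, e, c1, c2, count =>
    if start ≤ e then
      if start = e then
        (if c1 + c2 < PySem.List.pyGetD plants start 0 then count + 1 else count)
      else
        let ps := PySem.List.pyGetD plants start 0
        let pe := PySem.List.pyGetD plants e 0
        let c1' := if c1 < ps then cap1 else c1
        let cnt1 := if c1 < ps then count + 1 else count
        let c2' := if c2 < pe then cap2 else c2
        let cnt2 := if c2 < pe then cnt1 + 1 else cnt1
        wfLoop plants cap1 cap2 fuel (start + 1) (e - 1) (c1' - ps) (c2' - pe) cnt2
    else count

def watering_flowers (plants : List Int) (cap1 : Int) (cap2 : Int) : Int :=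
  wfLoop plants cap1 cap2 plants.length 0 ((plants.length : Int) - 1) 0 0 0

-- ===== PORT B =====
-- Source B's simulate loop body, state = (cnt, curr)
def simStep (cap : Int) (st : Int × Int) (need : Int) : Int × Int :=
  let st' := if st.2 < need then (st.1 + 1, cap) else (st.1, st.2)
  (st'.1, st'.2 - need)

def simulate (seq : List Int) (cap : Int) : Int × Int :=
  seq.foldl (simStep cap) (0, 0)

def watering_flowers_alt (plants : List Int) (cap1 : Int) (cap2 : Int) : Int :=
  let n := plants.length
  let h := n / 2
  let p1 := simulate (plants.take h) cap1
  let p2 := simulate (plants.reverse.take h) cap2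
  let total := p1.1 + p2.1
  if n % 2 = 1 ∧ p1.2 + p2.2 < PySem.List.pyGetD plants (h : Int) 0 then total + 1 else total

-- ===== PRECONDITION & SPEC =====
def Spec_watering_flowers (plants : List Int) (cap1 : Int) (cap2 : Int) (out : Int) : Prop := out = watering_flowers_alt plants cap1 cap2
instance (plants : List Int) (cap1 : Int) (cap2 : Int) (out : Int) : Decidable (Spec_watering_flowers plants cap1 cap2 out) := by unfold Spec_watering_flowers; infer_instance

-- ===== CLAIM (what is proved, stated in full; the proofs are below) =====
def Claim_equal_watering_flowers : Prop := ∀ (plants : List Int) (cap1 : Int) (cap2 : Int), Dom_watering_flowers plants cap1 cap2 → Spec_watering_flowers plants cap1 cap2 (watering_flowers plants cap1 cap2)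

-- ===== LEMMAS AND PROOFS =====

-- starting a fold with count a adds a to the count and leaves the residual unchanged
lemma sim_shift (cap : Int) (l : List Int) : ∀ (a c : Int),
    l.foldl (simStep cap) (a, c) =
      (a + (l.foldl (simStep cap) (0, c)).1, (l.foldl (simStep cap) (0, c)).2) := by
  induction l with
  | nil => intro a c; simp
  | cons x rest ih =>
    intro a c
    simp only [List.foldl_cons, simStep]
    by_cases hx : c < x
    · simp only [hx, if_pos]
      rw [ih (a + 1) (cap - x), ih (0 + 1) (cap - x)]
      exact Prod.ext (by ring) rfl
    · simp only [hx, if_neg, not_false_iff]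
      rw [ih a (c - x)]

-- one step of the fold, split into count and residual
lemma foldl_cons_fst (cap x c : Int) (l : List Int) :
    (List.foldl (simStep cap) (0, c) (x :: l)).1
      = (if c < x then 1 else 0)
        + (List.foldl (simStep cap) (0, (if c < x then cap else c) - x) l).1 := by
  by_cases h : c < x
  · simp [simStep, h, sim_shift cap l 1 (cap - x)]
  · simp [simStep, h]

lemma foldl_cons_snd (cap x c : Int) (l : List Int) :
    (List.foldl (simStep cap) (0, c) (x :: l)).2
      = (List.foldl (simStep cap) (0, (if c < x then cap else c) - x) l).2 := by
  by_cases h : c < x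
  · simp [simStep, h, sim_shift cap l 1 (cap - x)]
  · simp [simStep, h]

-- the two-pointer loop from symmetric position s equals the two independent folds on the rests
lemma wfLoop_eq (plants : List Int) (cap1 cap2 : Int) :
    ∀ (k s fuel : Nat) (c1 c2 count : Int),
    s + k = plants.length / 2 →
    k + 1 ≤ fuel →
    wfLoop plants cap1 cap2 fuel (s : Int) ((plants.length : Int) - 1 - (s : Int)) c1 c2 count =
      count
      + (((plants.take (plants.length / 2)).drop s).foldl (simStep cap1) (0, c1)).1
      + (((plants.reverse.take (plants.length / 2)).drop s).foldl (simStep cap2) (0, c2)).1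
      + (if plants.length % 2 = 1 ∧
            (((plants.take (plants.length / 2)).drop s).foldl (simStep cap1) (0, c1)).2
            + (((plants.reverse.take (plants.length / 2)).drop s).foldl (simStep cap2) (0, c2)).2
            < PySem.List.pyGetD plants ((plants.length / 2 : Nat) : Int) 0
          then 1 else 0) := by
  intro k
  induction k with
  | zero =>
    intro s fuel c1 c2 count hs hf
    obtain ⟨f, rfl⟩ : ∃ f, fuel = f + 1 := ⟨fuel - 1, by omega⟩
    have hsh : s = plants.length / 2 := by omega
    have hdropL : (plants.take (plants.length / 2)).drop s = [] :=
      List.drop_eq_nil_of_le (by simp [hsh])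
    have hdropR : (plants.reverse.take (plants.length / 2)).drop s = [] :=
      List.drop_eq_nil_of_le (by simp [hsh])
    rw [hdropL, hdropR]
    simp only [List.foldl_nil]
    rcases Nat.even_or_odd plants.length with he | ho
    · -- even length: loop condition already false, indicator off
      have hcond : ¬ ((s : Int) ≤ (plants.length : Int) - 1 - (s : Int)) := by
        obtain ⟨m, hm⟩ := he; omega
      have hmod : plants.length % 2 ≠ 1 := by omega
      simp [wfLoop, hcond, hmod]
    · -- odd length: middle element check
      have hse : (s : Int) = (plants.length : Int) - 1 - (s : Int) := by
        obtain ⟨m, hm⟩ := ho; omega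
      have hmod : plants.length % 2 = 1 := by omega
      simp only [wfLoop, hmod, true_and, hsh]
      split_ifs <;> omega
  | succ k ih =>
    intro s fuel c1 c2 count hs hf
    obtain ⟨f, rfl⟩ : ∃ f, fuel = f + 1 := ⟨fuel - 1, by omega⟩
    have hn : s + k + 1 ≤ plants.length / 2 := by omega
    have hslt : s < plants.length := by omega
    have hstake : s < (plants.take (plants.length / 2)).length := by simp; omega
    have hrtake : s < (plants.reverse.take (plants.length / 2)).length := by simp; omega
    have hcond : (s : Int) ≤ (plants.length : Int) - 1 - (s : Int) := by omega
    have hne : ¬ ((s : Int) = (plants.length : Int) - 1 - (s : Int)) := by omega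
    -- the two elements processed this iteration
    have hps : PySem.List.pyGetD plants (s : Int) 0 = plants[s] := by
      rw [PySem.List.pyGetD_natCast]; exact List.getD_eq_getElem _ _ hslt
    have hre : ((plants.length : Int) - 1 - (s : Int)) = ((plants.length - 1 - s : Nat) : Int) := by
      omega
    have hrlt : plants.length - 1 - s < plants.length := by omega
    have hpe : PySem.List.pyGetD plants ((plants.length : Int) - 1 - (s : Int)) 0
        = plants[plants.length - 1 - s] := by
      rw [hre, PySem.List.pyGetD_natCast]; exact List.getD_eq_getElem _ _ hrlt
    -- decompose the two drop-lists
    have hdL : (plants.take (plants.length / 2)).drop s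
        = plants[s] :: (plants.take (plants.length / 2)).drop (s + 1) := by
      rw [List.drop_eq_getElem_cons hstake, List.getElem_take]
    have hdR : (plants.reverse.take (plants.length / 2)).drop s
        = plants[plants.length - 1 - s] :: (plants.reverse.take (plants.length / 2)).drop (s + 1) := by
      rw [List.drop_eq_getElem_cons hrtake, List.getElem_take, List.getElem_reverse]
    have hcast1 : ((s : Int) + 1) = ((s + 1 : Nat) : Int) := by push_cast; ring
    have hcast2 : ((plants.length : Int) - 1 - (s : Int) - 1)
        = ((plants.length : Int) - 1 - ((s + 1 : Nat) : Int)) := by push_cast; ring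
    have step : wfLoop plants cap1 cap2 (f + 1) (s : Int)
        ((plants.length : Int) - 1 - (s : Int)) c1 c2 count
      = wfLoop plants cap1 cap2 f ((s + 1 : Nat) : Int)
        ((plants.length : Int) - 1 - ((s + 1 : Nat) : Int))
        ((if c1 < plants[s] then cap1 else c1) - plants[s])
        ((if c2 < plants[plants.length - 1 - s] then cap2 else c2) - plants[plants.length - 1 - s])
        ((if c2 < plants[plants.length - 1 - s]
            then (if c1 < plants[s] then count + 1 else count) + 1
            else (if c1 < plants[s] then count + 1 else count))) := by
      conv_lhs => rw [wfLoop]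
      rw [if_pos hcond, if_neg hne]
      simp only [hps, hpe, hcast1, hcast2]
    rw [step, ih (s + 1) f _ _ _ (by omega) (by omega)]
    rw [hdL, hdR]
    simp only [foldl_cons_fst, foldl_cons_snd]
    split_ifs <;> ring

-- ===== VERDICT (by name: the statement is the Claim_ definition above) =====
theorem watering_flowers_spec : Claim_equal_watering_flowers := by
  intro plants cap1 cap2 _
  show watering_flowers plants cap1 cap2 = watering_flowers_alt plants cap1 cap2
  cases plants with
  | nil =>
    show (0 : Int) = watering_flowers_alt [] cap1 cap2
    simp only [watering_flowers_alt, simulate, List.length_nil, List.take_nil,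
      List.reverse_nil, List.foldl_nil]
    norm_num
  | cons x xs =>
    have key := wfLoop_eq (x :: xs) cap1 cap2 ((x :: xs).length / 2) 0 (x :: xs).length
      0 0 0 (by omega) (by simp [List.length_cons]; omega)
    simp only [Nat.cast_zero, List.drop_zero, sub_zero] at key
    show wfLoop (x :: xs) cap1 cap2 (x :: xs).length 0 (((x :: xs).length : Int) - 1) 0 0 0
      = watering_flowers_alt (x :: xs) cap1 cap2
    rw [key]
    simp only [watering_flowers_alt, simulate]
    split_ifs <;> ring
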